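-- pv_equiv track=rewrite | github.com/AlvieSpurlock/MathCore | MathCore/MathTypes/Advanced/Topology.py | IsBase
-- ===== SOURCE A (Python) =====
-- import itertools   # combinations, product
--
-- def _fs(s):
--     """Convert any iterable to frozenset."""
--     return frozenset(s)
--
-- def _union(sets):
--     result = set()
--     for s in sets: result |= set(s)
--     return _fs(result)
--
-- def IsBase(base, open_sets):
--     oss = [_fs(U) for U in open_sets]
--     oss_set = set(oss)
--     base_fs = [_fs(b) for b in base]
--     # Every open set must be expressible as a union of base elements
--     for U in oss:
--         if U == _fs([]):
--             continue                                           # Empty set covered trivially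
--         covered = False
--         for r in range(1, len(base_fs) + 1):
--             for combo in itertools.combinations(base_fs, r):
--                 if _union(combo) == U:
--                     covered = True; break
--             if covered: break
--         if not covered:
--             return False                                       # U cannot be formed from base
--     return True                                               # All open sets covered → valid base
-- ===== SOURCE B (Python) =====
-- def IsBase(base, open_sets):
--     # For each open set U: the union of all base elements contained in U
--     # must equal U (as a set).  One pass over base per U, no combinations.
--     for U in open_sets:
--         u = set(U)
--         cover = set()
--         for b in base:
--             bs = set(b)
--             if bs <= u:
--                 cover |= bs
--         if cover != u:
--             return False
--     return True
-- ===== Notes on version B (the rewrite author's own statement) =====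
-- stated objective: faster
-- what changed: Instead of searching all 2^|base| combinations of base elements for one whose union equals U, B unions exactly the base elements contained in U and checks that this union equals U (the maximal candidate union), which is equivalent.
import Mathlib
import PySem

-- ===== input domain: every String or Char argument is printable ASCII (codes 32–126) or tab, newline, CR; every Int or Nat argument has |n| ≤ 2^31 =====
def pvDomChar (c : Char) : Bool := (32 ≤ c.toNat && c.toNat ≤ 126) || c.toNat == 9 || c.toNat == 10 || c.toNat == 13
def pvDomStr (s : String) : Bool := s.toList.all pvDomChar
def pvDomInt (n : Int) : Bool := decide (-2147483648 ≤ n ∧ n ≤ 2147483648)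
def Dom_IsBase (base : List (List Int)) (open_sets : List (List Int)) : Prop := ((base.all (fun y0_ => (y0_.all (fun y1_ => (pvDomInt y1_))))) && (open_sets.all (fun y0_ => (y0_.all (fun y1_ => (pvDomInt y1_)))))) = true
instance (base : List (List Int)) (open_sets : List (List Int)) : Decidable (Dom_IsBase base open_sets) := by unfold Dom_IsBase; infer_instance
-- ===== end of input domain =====

-- B replaces A's exponential search over all combinations of base elements with a
-- single pass per open set (union the base elements contained in U, compare with U);
-- objective: faster (asymptotic).

-- ===== PORT A =====
-- _union(sets): result = set(); for s in sets: result |= set(s)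
def pyUnion (sets : List (PySem.Set Int)) : PySem.Set Int :=
  sets.foldl (fun result s => PySem.Set.union result s) PySem.Set.empty

def IsBase (base : List (List Int)) (open_sets : List (List Int)) : Bool :=
  let oss := open_sets.map (fun U => PySem.Set.ofList U)
  -- Python also builds `oss_set = set(oss)`, which the function never uses; omitted.
  let base_fs := base.map (fun b => PySem.Set.ofList b)
  oss.all (fun U =>
    if PySem.Set.equal U PySem.Set.empty then true   -- empty set covered trivially
    else (List.range' 1 base_fs.length 1).any (fun r =>
      -- itertools.combinations(base_fs, r): the length-r sublists of base_fs
      (List.sublistsLen r base_fs).any (fun combo =>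
        PySem.Set.equal (pyUnion combo) U)))

-- ===== PORT B =====
def IsBase_alt (base : List (List Int)) (open_sets : List (List Int)) : Bool :=
  open_sets.all (fun U =>
    let u := PySem.Set.ofList U
    let cover := base.foldl (fun cover b =>
      let bs := PySem.Set.ofList b
      if PySem.Set.issubset bs u then PySem.Set.union cover bs else cover)
      PySem.Set.empty
    PySem.Set.equal cover u)

-- ===== PRECONDITION & SPEC =====
def Spec_IsBase (base : List (List Int)) (open_sets : List (List Int)) (out : Bool) : Prop := out = IsBase_alt base open_sets
instance (base : List (List Int)) (open_sets : List (List Int)) (out : Bool) : Decidable (Spec_IsBase base open_sets out) := by unfold Spec_IsBase; infer_instance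

-- ===== CLAIM (what is proved, stated in full; the proofs are below) =====
def Claim_equal_IsBase : Prop := ∀ (base : List (List Int)) (open_sets : List (List Int)), Dom_IsBase base open_sets → Spec_IsBase base open_sets (IsBase base open_sets)

-- ===== LEMMAS AND PROOFS =====

-- membership in the union loop of A's `_union`
theorem mem_pyUnion (sets : List (PySem.Set Int)) (x : Int) :
    x ∈ pyUnion sets ↔ ∃ s ∈ sets, x ∈ s := by
  have h : ∀ (l : List (PySem.Set Int)) (acc : PySem.Set Int),
      x ∈ l.foldl (fun result s => PySem.Set.union result s) acc ↔
        x ∈ acc ∨ ∃ s ∈ l, x ∈ s := by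
    intro l
    induction l with
    | nil => simp [List.foldl]
    | cons s l ih =>
      intro acc
      simp [List.foldl, ih, PySem.Set.mem_union, or_assoc]
  have := h sets PySem.Set.empty
  simpa [pyUnion, PySem.Set.empty] using this

-- membership in B's cover loop
theorem mem_cover (base : List (List Int)) (u : PySem.Set Int) (x : Int) :
    x ∈ base.foldl (fun cover b =>
        if PySem.Set.issubset (PySem.Set.ofList b) u then
          PySem.Set.union cover (PySem.Set.ofList b) else cover) PySem.Set.empty ↔
      ∃ b ∈ base, (∀ y ∈ b, y ∈ u) ∧ x ∈ b := by
  have h : ∀ (l : List (List Int)) (acc : PySem.Set Int),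
      x ∈ l.foldl (fun cover b =>
          if PySem.Set.issubset (PySem.Set.ofList b) u then
            PySem.Set.union cover (PySem.Set.ofList b) else cover) acc ↔
        x ∈ acc ∨ ∃ b ∈ l, (∀ y ∈ b, y ∈ u) ∧ x ∈ b := by
    intro l
    induction l with
    | nil => simp [List.foldl]
    | cons b l ih =>
      intro acc
      rw [List.foldl_cons]
      by_cases hb : PySem.Set.issubset (PySem.Set.ofList b) u = true
      · have hsub : ∀ y ∈ b, y ∈ u := fun y hy =>
          (PySem.Set.issubset_iff _ _).1 hb y ((PySem.Set.mem_ofList _ _).2 hy)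
        rw [if_pos hb, ih]
        simp only [PySem.Set.mem_union, PySem.Set.mem_ofList, List.mem_cons]
        constructor
        · rintro ((hx | hx) | ⟨b', hb', hs, hx⟩)
          · exact Or.inl hx
          · exact Or.inr ⟨b, Or.inl rfl, hsub, hx⟩
          · exact Or.inr ⟨b', Or.inr hb', hs, hx⟩
        · rintro (hx | ⟨b', hb', hs, hx⟩)
          · exact Or.inl (Or.inl hx)
          · rcases hb' with rfl | hb'
            · exact Or.inl (Or.inr hx)
            · exact Or.inr ⟨b', hb', hs, hx⟩
      · have hnsub : ¬ ∀ y ∈ b, y ∈ u := fun hall => hb ((PySem.Set.issubset_iff _ _).2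
          (fun y hy => hall y ((PySem.Set.mem_ofList _ _).1 hy)))
        rw [if_neg hb, ih]
        simp only [List.mem_cons]
        constructor
        · rintro (hx | ⟨b', hb', hs, hx⟩)
          · exact Or.inl hx
          · exact Or.inr ⟨b', Or.inr hb', hs, hx⟩
        · rintro (hx | ⟨b', hb', hs, hx⟩)
          · exact Or.inl hx
          · rcases hb' with rfl | hb'
            · exact absurd hs hnsub
            · exact Or.inr ⟨b', hb', hs, hx⟩
  have := h base PySem.Set.empty
  simpa [PySem.Set.empty] using this

-- the per-open-set equivalence: A's combination search succeeds iff the union of the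
-- base elements contained in u equals u
theorem inner_iff (base : List (List Int)) (u : PySem.Set Int) :
    ((if PySem.Set.equal u PySem.Set.empty then true
      else (List.range' 1 (base.map (fun b => PySem.Set.ofList b)).length 1).any (fun r =>
        (List.sublistsLen r (base.map (fun b => PySem.Set.ofList b))).any (fun combo =>
          PySem.Set.equal (pyUnion combo) u))) = true) ↔
    (PySem.Set.equal
      (base.foldl (fun cover b =>
        if PySem.Set.issubset (PySem.Set.ofList b) u then
          PySem.Set.union cover (PySem.Set.ofList b) else cover) PySem.Set.empty)
      u = true) := by
  by_cases hempty : PySem.Set.equal u PySem.Set.empty = true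
  · -- u is empty: A skips it, B's cover is empty too
    have hu : ∀ x : Int, x ∉ u := by
      intro x hx
      have := ((PySem.Set.equal_iff u PySem.Set.empty).1 hempty x).1 hx
      simp [PySem.Set.empty] at this
    simp only [hempty, if_pos]
    constructor
    · intro _
      rw [PySem.Set.equal_iff]
      intro x
      rw [mem_cover]
      constructor
      · rintro ⟨b, _, hsub, hxb⟩; exact hsub x hxb
      · intro hx; exact absurd hx (hu x)
    · intro _; trivial
  · -- u is nonempty
    simp only [hempty, if_neg, Bool.false_eq_true, not_false_iff]
    rw [PySem.Set.equal_iff]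
    simp only [List.any_eq_true, List.mem_range'_1, List.mem_sublistsLen]
    constructor
    · -- some combination unions to u  ⇒  cover = u
      rintro ⟨r, ⟨hr1, _⟩, combo, ⟨hsub, _⟩, hcombo⟩
      have hcombo' := (PySem.Set.equal_iff _ _).1 hcombo
      intro x
      rw [mem_cover]
      constructor
      · rintro ⟨b, _, hbsub, hxb⟩; exact hbsub x hxb
      · intro hxu
        -- x ∈ u = union combo, so x lies in some member of combo, which is ofList b
        -- for some b ∈ base with b ⊆ u
        have hxU : x ∈ pyUnion combo := (hcombo' x).2 hxu
        obtain ⟨s, hs, hxs⟩ := (mem_pyUnion combo x).1 hxU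
        have hsmem : s ∈ base.map (fun b => PySem.Set.ofList b) := hsub.mem hs
        obtain ⟨b, hb, rfl⟩ := List.mem_map.1 hsmem
        refine ⟨b, hb, ?_, (PySem.Set.mem_ofList _ _).1 hxs⟩
        intro y hy
        exact (hcombo' y).1 ((mem_pyUnion combo y).2
          ⟨_, hs, (PySem.Set.mem_ofList _ _).2 hy⟩)
    · -- cover = u  ⇒  the combination of all base elements ⊆ u unions to u
      intro hcov
      obtain ⟨x0, hx0⟩ : ∃ x : Int, x ∈ u := by
        by_contra hno
        push Not at hno
        exact hempty ((PySem.Set.equal_iff _ _).2 (by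
          intro x; simp [PySem.Set.empty, hno x]))
      set bf := base.map (fun b => PySem.Set.ofList b) with hbf
      set combo := bf.filter (fun s => PySem.Set.issubset s u) with hc
      have hsubl : combo.Sublist bf := by rw [hc]; exact List.filter_sublist
      have hcovx := hcov
      -- combo is nonempty: x0 ∈ u = cover gives a base element ⊆ u
      have hx0c := ((hcov x0).symm.1 hx0)
      obtain ⟨b0, hb0, hb0sub, _⟩ := (mem_cover base u x0).1 hx0c
      have hb0c : PySem.Set.ofList b0 ∈ combo := by
        rw [hc]
        refine List.mem_filter.2 ⟨List.mem_map.2 ⟨b0, hb0, rfl⟩, ?_⟩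
        exact (PySem.Set.issubset_iff _ _).2 (by
          intro y hy; exact hb0sub y ((PySem.Set.mem_ofList _ _).1 hy))
      refine ⟨combo.length, ⟨?_, ?_⟩, combo, ⟨hsubl, rfl⟩, ?_⟩
      · exact Nat.one_le_iff_ne_zero.2 (by
          intro h0
          rw [List.length_eq_zero_iff] at h0
          simp [h0] at hb0c)
      · have := hsubl.length_le
        omega
      · rw [PySem.Set.equal_iff]
        intro y
        rw [mem_pyUnion]
        constructor
        · rintro ⟨s, hs, hys⟩
          have hsf := List.mem_filter.1 (hc ▸ hs)
          have : PySem.Set.issubset s u = true := by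
            simpa using hsf.2
          exact (PySem.Set.issubset_iff _ _).1 this y hys
        · intro hyu
          have := ((hcov y).symm.1 hyu)
          obtain ⟨b, hb, hbsub, hyb⟩ := (mem_cover base u y).1 this
          refine ⟨PySem.Set.ofList b, ?_, (PySem.Set.mem_ofList _ _).2 hyb⟩
          rw [hc]
          refine List.mem_filter.2 ⟨List.mem_map.2 ⟨b, hb, rfl⟩, ?_⟩
          exact (PySem.Set.issubset_iff _ _).2 (by
            intro z hz; exact hbsub z ((PySem.Set.mem_ofList _ _).1 hz))

-- ===== VERDICT (by name: the statement is the Claim_ definition above) =====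
theorem IsBase_spec : Claim_equal_IsBase := by
  intro base open_sets _
  unfold Spec_IsBase IsBase IsBase_alt
  simp only [List.all_map]
  congr 1
  funext U
  exact Bool.eq_iff_iff.2 (inner_iff base (PySem.Set.ofList U))
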